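-- pv_equiv track=rewrite | github.com/harp-lab/srdatalog-python | src/srdatalog/viz/html.py | _extract_rule_kw
-- ===== SOURCE A (Python) =====
-- def _extract_rule_kw(block: str) -> str:
--   '''Pull the value following ":rule " from an execute-pipeline block.'''
--   marker = ":rule "
--   idx = block.find(marker)
--   if idx < 0:
--     return ""
--   rest = block[idx + len(marker) :]
--   # Atom up to whitespace or `)`.
--   end = 0
--   while end < len(rest) and rest[end] not in " \t\n\r)":
--     end += 1
--   return rest[:end]
-- ===== SOURCE B (Python) =====
-- def _extract_rule_kw(block: str) -> str:
--   '''Pull the value following ":rule " from an execute-pipeline block.'''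
--   _head, sep, rest = block.partition(":rule ")
--   if not sep:
--     return ""
--   # Leading atom: chop at the first occurrence of each terminator in turn.
--   for d in " \t\n\r)":
--     rest = rest.split(d, 1)[0]
--   return rest
-- ===== Notes on version B (the rewrite author's own statement) =====
-- stated objective: idiomatic
-- what changed: B replaces A's find-index plus manual character-incrementing while-scan by str.partition(':rule ') followed by chopping the remainder with split(d, 1)[0] for each terminator character.
import Mathlib
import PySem

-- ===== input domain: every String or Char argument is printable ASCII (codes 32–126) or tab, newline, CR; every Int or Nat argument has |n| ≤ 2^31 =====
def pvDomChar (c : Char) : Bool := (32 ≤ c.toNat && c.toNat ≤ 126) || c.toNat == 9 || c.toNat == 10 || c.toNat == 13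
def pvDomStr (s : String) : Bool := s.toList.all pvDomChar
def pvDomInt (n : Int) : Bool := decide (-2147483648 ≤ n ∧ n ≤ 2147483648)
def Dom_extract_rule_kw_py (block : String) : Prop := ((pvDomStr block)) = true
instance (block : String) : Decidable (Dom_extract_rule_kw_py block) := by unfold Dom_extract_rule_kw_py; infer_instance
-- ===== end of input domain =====

-- B replaces A's find-then-manual-index scan by partition(":rule ") followed by chopping the
-- remainder at each terminator with split(d, 1)[0] (objective: more idiomatic decomposition).

-- ===== PORT A =====
-- the while loop: end starts at 0, advances while rest[end] is not in " \t\n\r)"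
def pvALoop : List Char → Nat
  | [] => 0
  | c :: cs => if (c == ' ' || c == '\t' || c == '\n' || c == '\r' || c == ')') then 0
               else pvALoop cs + 1

def extract_rule_kw_py (block : String) : String :=
  -- idx = block.find(":rule "); len(marker) = 6
  if PySem.Str.find block ":rule " < 0 then ""
  else
    -- rest = block[idx + 6 :]; rest[:end] with 0 <= end <= len(rest) is exact as List.take
    String.ofList
      ((PySem.Str.slice block (some (PySem.Str.find block ":rule " + 6)) none).toList.take
        (pvALoop (PySem.Str.slice block (some (PySem.Str.find block ":rule " + 6)) none).toList))

-- ===== PORT B =====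
-- str.partition(sep) for a nonempty sep: exact hand port via find (first occurrence)
def pvPartition (s : String) (sep : String) : String × String × String :=
  let i := PySem.Str.find s sep
  if i < 0 then (s, "", "")
  else (String.ofList (s.toList.take i.toNat), sep,
        String.ofList (s.toList.drop (i.toNat + sep.toList.length)))

-- rest.split(d, 1)[0] for a one-char separator: exact as the prefix before the first d
def pvSplit1Head (cs : List Char) (d : Char) : List Char :=
  cs.takeWhile (fun c => c != d)

def extract_rule_kw_py_alt (block : String) : String :=
  if (pvPartition block ":rule ").2.1 = "" then ""
  else
    String.ofList
      ((" \t\n\r)".toList).foldl pvSplit1Head (pvPartition block ":rule ").2.2.toList)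

-- ===== PRECONDITION & SPEC =====
def Spec_extract_rule_kw_py (block : String) (out : String) : Prop := out = extract_rule_kw_py_alt block
instance (block : String) (out : String) : Decidable (Spec_extract_rule_kw_py block out) := by unfold Spec_extract_rule_kw_py; infer_instance

-- ===== CLAIM (what is proved, stated in full; the proofs are below) =====
def Claim_equal_extract_rule_kw_py : Prop := ∀ (block : String), Dom_extract_rule_kw_py block → Spec_extract_rule_kw_py block (extract_rule_kw_py block)

-- ===== LEMMAS AND PROOFS =====

-- A's scan length cut out of the list is the takeWhile prefix
theorem take_pvALoop (L : List Char) :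
    L.take (pvALoop L) =
      L.takeWhile (fun c => !(c == ' ' || c == '\t' || c == '\n' || c == '\r' || c == ')')) := by
  induction L with
  | nil => rfl
  | cons c cs ih =>
    cases h : (c == ' ' || c == '\t' || c == '\n' || c == '\r' || c == ')') with
    | true =>
      simp only [pvALoop, h, List.takeWhile_cons, Bool.not_true]
      rfl
    | false =>
      simp only [pvALoop, h, List.takeWhile_cons, Bool.not_false]
      simp [ih]

-- B's fold of five split(d,1)[0] chops is the same takeWhile prefix
theorem fold_pvSplit1Head (L : List Char) :
    (" \t\n\r)".toList).foldl pvSplit1Head L =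
      L.takeWhile (fun c => !(c == ' ' || c == '\t' || c == '\n' || c == '\r' || c == ')')) := by
  have cs : " \t\n\r)".toList = [' ', '\t', '\n', '\r', ')'] := by decide
  rw [cs]
  simp only [List.foldl, pvSplit1Head, List.takeWhile_takeWhile]
  congr 1
  funext c
  cases h1 : c == ' ' <;> cases h2 : c == '\t' <;> cases h3 : c == '\n' <;>
    cases h4 : c == '\r' <;> cases h5 : c == ')' <;> simp [bne, h1, h2, h3, h4, h5]

-- ===== VERDICT (by name: the statement is the Claim_ definition above) =====
theorem extract_rule_kw_py_spec : Claim_equal_extract_rule_kw_py := by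
  intro block _
  unfold Spec_extract_rule_kw_py extract_rule_kw_py extract_rule_kw_py_alt pvPartition
  by_cases h : PySem.Str.find block ":rule " < 0
  · rw [if_pos h, if_pos h]
    simp
  · rw [if_neg h, if_neg h]
    have hsep : ¬ ((":rule " : String) = "") := by decide
    rw [if_neg hsep]
    have hslice : (PySem.Str.slice block (some (PySem.Str.find block ":rule " + 6)) none).toList
        = block.toList.drop ((PySem.Str.find block ":rule ").toNat + (":rule " : String).toList.length) := by
      have h6 : ((":rule " : String).toList.length) = 6 := by decide
      rw [h6, PySem.Str.toList_slice, PySem.Chars.slice_eq_listSlice,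
        PySem.List.slice_from _ (by omega)]
      congr 1
      omega
    simp only [fold_pvSplit1Head, take_pvALoop, String.toList_ofList, hslice]
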